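-- pv_equiv track=rewrite | github.com/MASILab/FLAIR_Tract | scripts/lmax.py | calculate_max_lmax
-- ===== SOURCE A (Python) =====
-- def calculate_max_lmax(n_directions):
--     """
--     Calculate max even SH degree supported by n_directions.
--     Returns 0 if insufficient for L=2.
--     """
--     if n_directions < 6:
--         return 0
--
--     max_l = 0
--     for l in range(2, 20, 2):
--         required = (l + 1) * (l + 2) // 2
--         if n_directions >= required:
--             max_l = l
--         else:
--             break
--     return max_l
-- ===== SOURCE B (Python) =====
-- # Binary search over a precomputed threshold table instead of a sequential
-- # scan that recomputes coefficient counts.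
-- _THRESHOLDS = (6, 15, 28, 45, 66, 91, 120, 153, 190)  # min dirs for l = 2,4,...,18
--
-- def calculate_max_lmax(n_directions):
--     lo, hi = 0, len(_THRESHOLDS)
--     while lo < hi:
--         mid = (lo + hi) // 2
--         if n_directions >= _THRESHOLDS[mid]:
--             lo = mid + 1
--         else:
--             hi = mid
--     return 2 * lo
-- ===== Notes on version B (the rewrite author's own statement) =====
-- stated objective: alternative
-- what changed: Replaced the sequential loop that recomputes the SH coefficient count for each candidate degree with a binary search over a precomputed table of direction-count thresholds.
import Mathlib
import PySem

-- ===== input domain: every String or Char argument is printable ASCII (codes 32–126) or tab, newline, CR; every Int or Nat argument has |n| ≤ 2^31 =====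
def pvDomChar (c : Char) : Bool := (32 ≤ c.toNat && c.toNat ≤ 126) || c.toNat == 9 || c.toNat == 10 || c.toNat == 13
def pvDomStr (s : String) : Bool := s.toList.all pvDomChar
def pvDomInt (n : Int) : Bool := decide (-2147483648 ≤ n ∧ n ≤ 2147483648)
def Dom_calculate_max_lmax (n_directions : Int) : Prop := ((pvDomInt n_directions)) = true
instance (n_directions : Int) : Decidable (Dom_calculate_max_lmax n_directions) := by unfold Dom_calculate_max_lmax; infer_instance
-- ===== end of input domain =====

-- B replaces A's sequential threshold scan by a binary search over a precomputed
-- threshold table (alternative algorithm, same results).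

-- ===== PORT A =====
-- the for-loop with break, as structural recursion over range(2, 20, 2)
def pvLoopA (n_directions : Int) : List Int → Int → Int
  | [], max_l => max_l
  | l :: rest, max_l =>
      let required := PySem.Int.floordiv ((l + 1) * (l + 2)) 2
      if n_directions ≥ required then pvLoopA n_directions rest l
      else max_l  -- break

def calculate_max_lmax (n_directions : Int) : Int :=
  if n_directions < 6 then 0
  else pvLoopA n_directions (PySem.List.pyRange 2 20 2) 0

-- ===== PORT B =====
def pvThresholds : List Int := [6, 15, 28, 45, 66, 91, 120, 153, 190]

-- the while-loop of B; indices stay inside the 9-element table, so getD never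
-- takes its default
def pvBsearch (n_directions : Int) (lo hi : Nat) : Nat :=
  if lo < hi then
    let mid := (lo + hi) / 2
    if n_directions ≥ pvThresholds.getD mid 0 then pvBsearch n_directions (mid + 1) hi
    else pvBsearch n_directions lo mid
  else lo
termination_by hi - lo
decreasing_by all_goals omega

def calculate_max_lmax_alt (n_directions : Int) : Int :=
  2 * (pvBsearch n_directions 0 pvThresholds.length : Int)

-- ===== PRECONDITION & SPEC =====
def Spec_calculate_max_lmax (n_directions : Int) (out : Int) : Prop := out = calculate_max_lmax_alt n_directions
instance (n_directions : Int) (out : Int) : Decidable (Spec_calculate_max_lmax n_directions out) := by unfold Spec_calculate_max_lmax; infer_instance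

-- ===== CLAIM (what is proved, stated in full; the proofs are below) =====
def Claim_equal_calculate_max_lmax : Prop := ∀ (n_directions : Int), Dom_calculate_max_lmax n_directions → Spec_calculate_max_lmax n_directions (calculate_max_lmax n_directions)

-- ===== LEMMAS AND PROOFS =====


lemma bs_done (n : Int) (lo hi : Nat) (h : ¬ lo < hi) : pvBsearch n lo hi = lo := by
  rw [pvBsearch]; simp [h]

lemma bs_ge (n : Int) (lo hi : Nat) (h : lo < hi)
    (h2 : pvThresholds[(lo + hi) / 2]?.getD 0 ≤ n) :
    pvBsearch n lo hi = pvBsearch n ((lo + hi) / 2 + 1) hi := by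
  rw [pvBsearch]; simp [h, List.getD, h2]

lemma bs_lt (n : Int) (lo hi : Nat) (h : lo < hi)
    (h2 : ¬ pvThresholds[(lo + hi) / 2]?.getD 0 ≤ n) :
    pvBsearch n lo hi = pvBsearch n lo ((lo + hi) / 2) := by
  rw [pvBsearch]; simp [h, List.getD, h2]

lemma bs_val (n : Int) : pvBsearch n 0 9 =
    if n < 6 then 0 else if n < 15 then 1 else if n < 28 then 2 else if n < 45 then 3
    else if n < 66 then 4 else if n < 91 then 5 else if n < 120 then 6 else if n < 153 then 7
    else if n < 190 then 8 else 9 := by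
  split_ifs with h1 h2 h3 h4 h5 h6 h7 h8 h9
  · rw [bs_lt n 0 9 (by omega) (by simp [pvThresholds]; omega), bs_lt n 0 4 (by omega) (by simp [pvThresholds]; omega), bs_lt n 0 2 (by omega) (by simp [pvThresholds]; omega), bs_lt n 0 1 (by omega) (by simp [pvThresholds]; omega), bs_done n 0 0 (by omega)]
  · rw [bs_lt n 0 9 (by omega) (by simp [pvThresholds]; omega), bs_lt n 0 4 (by omega) (by simp [pvThresholds]; omega), bs_lt n 0 2 (by omega) (by simp [pvThresholds]; omega), bs_ge n 0 1 (by omega) (by simp [pvThresholds]; omega), bs_done n 1 1 (by omega)]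
  · rw [bs_lt n 0 9 (by omega) (by simp [pvThresholds]; omega), bs_lt n 0 4 (by omega) (by simp [pvThresholds]; omega), bs_ge n 0 2 (by omega) (by simp [pvThresholds]; omega), bs_done n 2 2 (by omega)]
  · rw [bs_lt n 0 9 (by omega) (by simp [pvThresholds]; omega), bs_ge n 0 4 (by omega) (by simp [pvThresholds]; omega), bs_lt n 3 4 (by omega) (by simp [pvThresholds]; omega), bs_done n 3 3 (by omega)]
  · rw [bs_lt n 0 9 (by omega) (by simp [pvThresholds]; omega), bs_ge n 0 4 (by omega) (by simp [pvThresholds]; omega), bs_ge n 3 4 (by omega) (by simp [pvThresholds]; omega), bs_done n 4 4 (by omega)]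
  · rw [bs_ge n 0 9 (by omega) (by simp [pvThresholds]; omega), bs_lt n 5 9 (by omega) (by simp [pvThresholds]; omega), bs_lt n 5 7 (by omega) (by simp [pvThresholds]; omega), bs_lt n 5 6 (by omega) (by simp [pvThresholds]; omega), bs_done n 5 5 (by omega)]
  · rw [bs_ge n 0 9 (by omega) (by simp [pvThresholds]; omega), bs_lt n 5 9 (by omega) (by simp [pvThresholds]; omega), bs_lt n 5 7 (by omega) (by simp [pvThresholds]; omega), bs_ge n 5 6 (by omega) (by simp [pvThresholds]; omega), bs_done n 6 6 (by omega)]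
  · rw [bs_ge n 0 9 (by omega) (by simp [pvThresholds]; omega), bs_lt n 5 9 (by omega) (by simp [pvThresholds]; omega), bs_ge n 5 7 (by omega) (by simp [pvThresholds]; omega), bs_done n 7 7 (by omega)]
  · rw [bs_ge n 0 9 (by omega) (by simp [pvThresholds]; omega), bs_ge n 5 9 (by omega) (by simp [pvThresholds]; omega), bs_lt n 8 9 (by omega) (by simp [pvThresholds]; omega), bs_done n 8 8 (by omega)]
  · rw [bs_ge n 0 9 (by omega) (by simp [pvThresholds]; omega), bs_ge n 5 9 (by omega) (by simp [pvThresholds]; omega), bs_ge n 8 9 (by omega) (by simp [pvThresholds]; omega), bs_done n 9 9 (by omega)]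


set_option maxHeartbeats 1000000 in
lemma loopA_val (n : Int) (h : ¬ n < 6) :
    pvLoopA n (PySem.List.pyRange 2 20 2) 0 =
    if n < 15 then 2 else if n < 28 then 4 else if n < 45 then 6 else if n < 66 then 8
    else if n < 91 then 10 else if n < 120 then 12 else if n < 153 then 14 else if n < 190 then 16
    else 18 := by
  rw [show PySem.List.pyRange 2 20 2 = [2, 4, 6, 8, 10, 12, 14, 16, 18] from by decide]
  simp only [pvLoopA, show PySem.Int.floordiv ((2+1)*(2+2)) 2 = 6 from by decide, show PySem.Int.floordiv ((4+1)*(4+2)) 2 = 15 from by decide, show PySem.Int.floordiv ((6+1)*(6+2)) 2 = 28 from by decide, show PySem.Int.floordiv ((8+1)*(8+2)) 2 = 45 from by decide, show PySem.Int.floordiv ((10+1)*(10+2)) 2 = 66 from by decide, show PySem.Int.floordiv ((12+1)*(12+2)) 2 = 91 from by decide, show PySem.Int.floordiv ((14+1)*(14+2)) 2 = 120 from by decide, show PySem.Int.floordiv ((16+1)*(16+2)) 2 = 153 from by decide, show PySem.Int.floordiv ((18+1)*(18+2)) 2 = 190 from by decide]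
  split_ifs <;> omega

-- ===== VERDICT (by name: the statement is the Claim_ definition above) =====
theorem calculate_max_lmax_spec : Claim_equal_calculate_max_lmax := by
  intro n _
  unfold Spec_calculate_max_lmax calculate_max_lmax calculate_max_lmax_alt
  rw [show pvThresholds.length = 9 from by decide, bs_val n]
  by_cases h : n < 6
  · simp [h]
  · rw [if_neg h, loopA_val n h]
    split_ifs <;> omega
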